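-- pv_equiv track=rewrite | github.com/Hayser8/proyecto1modsim | src/picking/tours.py | _manhattan_path
-- ===== SOURCE A (Python) =====
-- from typing import List, Iterable, Tuple, Set
--
-- def _manhattan_path(a: Tuple[int,int], b: Tuple[int,int]) -> List[Tuple[int,int]]:
--     """Camino Manhattan simple (recto en x, luego en y). 1 celda = 1 m."""
--     x0, y0 = a
--     x1, y1 = b
--     path: List[Tuple[int,int]] = [(x0, y0)]
--     # mover en x
--     if x1 != x0:
--         dx = 1 if x1 > x0 else -1
--         for x in range(x0 + dx, x1 + dx, dx):
--             path.append((x, y0))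
--             if x == x1:
--                 break
--     # mover en y
--     if y1 != y0:
--         dy = 1 if y1 > y0 else -1
--         for y in range(y0 + dy, y1 + dy, dy):
--             path.append((x1, y))
--             if y == y1:
--                 break
--     # garantizar final exacto
--     if not path or path[-1] != (x1, y1):
--         path.append((x1, y1))
--     return path
-- ===== SOURCE B (Python) =====
-- def _manhattan_path(a, b):
--     """Closed-form: the i-th cell of the path computed directly from the step index."""
--     (x0, y0), (x1, y1) = a, b
--     sx = 1 if x1 >= x0 else -1
--     sy = 1 if y1 >= y0 else -1
--     adx = abs(x1 - x0)
--     ady = abs(y1 - y0)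
--     return [(x0 + sx * min(i, adx), y0 + sy * max(i - adx, 0))
--             for i in range(adx + ady + 1)]
-- ===== Notes on version B (the rewrite author's own statement) =====
-- stated objective: alternative
-- what changed: Replaces A's sequential construction (two precomputed range() loops with break plus a final-endpoint guard) by a closed-form indexed comprehension: the i-th path cell is computed directly from the step index i via min/max arithmetic, with no sequential state at all.
import Mathlib
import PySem

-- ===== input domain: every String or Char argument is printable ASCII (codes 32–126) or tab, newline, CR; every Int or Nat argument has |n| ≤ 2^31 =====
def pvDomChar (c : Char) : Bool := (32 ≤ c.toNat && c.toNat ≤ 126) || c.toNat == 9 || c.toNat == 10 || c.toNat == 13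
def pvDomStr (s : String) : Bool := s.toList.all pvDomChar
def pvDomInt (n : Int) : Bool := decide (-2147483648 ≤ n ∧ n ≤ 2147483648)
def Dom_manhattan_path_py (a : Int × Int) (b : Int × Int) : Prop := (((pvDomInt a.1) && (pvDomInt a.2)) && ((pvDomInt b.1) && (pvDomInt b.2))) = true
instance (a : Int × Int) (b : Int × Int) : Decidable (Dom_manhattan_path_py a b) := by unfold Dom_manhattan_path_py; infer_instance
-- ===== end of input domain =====

-- B replaces A's sequential construction (two range loops with break plus a final
-- guard) by a closed-form indexed comprehension: cell i from the step index i.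

-- ===== PORT A =====
-- the body of one of A's for-loops: append f x, break when x == stop
def pvLoopSeg (stop : Int) (f : Int → Int × Int) :
    List Int → List (Int × Int) → List (Int × Int)
  | [], path => path
  | x :: rest, path =>
    let path' := path ++ [f x]
    if x = stop then path' else pvLoopSeg stop f rest path'

def manhattan_path_py (a : Int × Int) (b : Int × Int) : List (Int × Int) :=
  let x0 := a.1; let y0 := a.2
  let x1 := b.1; let y1 := b.2
  let path : List (Int × Int) := [(x0, y0)]
  -- mover en x
  let path :=
    if x1 ≠ x0 then
      let dx : Int := if x1 > x0 then 1 else -1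
      pvLoopSeg x1 (fun x => (x, y0)) (PySem.List.pyRange (x0 + dx) (x1 + dx) dx) path
    else path
  -- mover en y
  let path :=
    if y1 ≠ y0 then
      let dy : Int := if y1 > y0 then 1 else -1
      pvLoopSeg y1 (fun y => (x1, y)) (PySem.List.pyRange (y0 + dy) (y1 + dy) dy) path
    else path
  -- garantizar final exacto
  if path = [] ∨ path.getLast? ≠ some (x1, y1) then path ++ [(x1, y1)] else path

-- ===== PORT B =====
def manhattan_path_py_alt (a : Int × Int) (b : Int × Int) : List (Int × Int) :=
  let x0 := a.1; let y0 := a.2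
  let x1 := b.1; let y1 := b.2
  let sx : Int := if x1 ≥ x0 then 1 else -1
  let sy : Int := if y1 ≥ y0 then 1 else -1
  let adx : Int := |x1 - x0|
  let ady : Int := |y1 - y0|
  (PySem.List.pyRange 0 (adx + ady + 1) 1).map
    (fun i => (x0 + sx * min i adx, y0 + sy * max (i - adx) 0))

-- ===== PRECONDITION & SPEC =====
def Spec_manhattan_path_py (a : Int × Int) (b : Int × Int) (out : List (Int × Int)) : Prop := out = manhattan_path_py_alt a b
instance (a : Int × Int) (b : Int × Int) (out : List (Int × Int)) : Decidable (Spec_manhattan_path_py a b out) := by unfold Spec_manhattan_path_py; infer_instance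

-- ===== CLAIM (what is proved, stated in full; the proofs are below) =====
def Claim_equal_manhattan_path_py : Prop := ∀ (a : Int × Int) (b : Int × Int), Dom_manhattan_path_py a b → Spec_manhattan_path_py a b (manhattan_path_py a b)

-- ===== LEMMAS AND PROOFS =====

-- the cells strictly after s on the straight integer walk from s to t, inclusive of t
def pvSeg (t s : Int) : List Int :=
  if _h : s = t then []
  else
    let d : Int := if s < t then 1 else -1
    (s + d) :: pvSeg t (s + d)
termination_by (t - s).natAbs
decreasing_by split <;> omega

theorem pvSeg_nil (t : Int) : pvSeg t t = [] := by rw [pvSeg]; simp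

theorem pvSeg_cons_pos {s t : Int} (h : s < t) : pvSeg t s = (s + 1) :: pvSeg t (s + 1) := by
  rw [pvSeg]
  rw [dif_neg (by omega : ¬ s = t)]
  simp [if_pos h]

theorem pvSeg_cons_neg {s t : Int} (h : t < s) : pvSeg t s = (s - 1) :: pvSeg t (s - 1) := by
  rw [pvSeg]
  rw [dif_neg (by omega : ¬ s = t)]
  simp only [if_neg (by omega : ¬ s < t)]
  rw [show s + (-1 : Int) = s - 1 from by ring]

theorem pvSeg_ne_nil {s t : Int} (h : s ≠ t) : pvSeg t s ≠ [] := by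
  rcases lt_or_gt_of_ne h with h3 | h3
  · rw [pvSeg_cons_pos h3]; simp
  · rw [pvSeg_cons_neg h3]; simp

theorem pvSeg_getLast (t : Int) : ∀ (n : ℕ) (s : Int), s ≠ t → (t - s).natAbs = n →
    (pvSeg t s).getLast? = some t := by
  intro n
  induction n using Nat.strong_induction_on with
  | _ n ih =>
    intro s hst hn
    rcases lt_or_gt_of_ne hst with h | h
    · rw [pvSeg_cons_pos h]
      by_cases h2 : s + 1 = t
      · rw [h2, pvSeg_nil]; rfl
      · rw [List.getLast?_cons, ih (t - (s+1)).natAbs (by omega) (s+1) h2 rfl]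
        simp
    · rw [pvSeg_cons_neg h]
      by_cases h2 : s - 1 = t
      · rw [h2, pvSeg_nil]; rfl
      · rw [List.getLast?_cons, ih (t - (s-1)).natAbs (by omega) (s-1) h2 rfl]
        simp

theorem pvSeg_getLast' {s t : Int} (h : s ≠ t) : (pvSeg t s).getLast? = some t :=
  pvSeg_getLast t (t - s).natAbs s h rfl

-- closed forms of pvSeg: the k-th cell after s is s ± (k+1)
theorem pvSeg_eq_map_pos : ∀ (n : ℕ) (s : Int),
    pvSeg (s + n) s = (List.range n).map (fun k : ℕ => s + ((k : Int) + 1)) := by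
  intro n
  induction n with
  | zero => intro s; simpa using pvSeg_nil s
  | succ n ih =>
    intro s
    rw [show ((n + 1 : ℕ) : Int) = (n : Int) + 1 from by push_cast; ring]
    rw [pvSeg_cons_pos (by omega : s < s + ((n : Int) + 1)),
        show s + ((n : Int) + 1) = (s + 1) + n from by ring, ih (s + 1),
        List.range_succ_eq_map]
    simp only [List.map_cons, List.map_map, Function.comp_def, Nat.cast_zero]
    refine congrArg₂ _ (by ring) ?_
    exact List.map_congr_left (fun k _ => by push_cast; ring)

theorem pvSeg_eq_map_neg : ∀ (n : ℕ) (s : Int),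
    pvSeg (s - n) s = (List.range n).map (fun k : ℕ => s - ((k : Int) + 1)) := by
  intro n
  induction n with
  | zero => intro s; simpa using pvSeg_nil s
  | succ n ih =>
    intro s
    rw [show ((n + 1 : ℕ) : Int) = (n : Int) + 1 from by push_cast; ring]
    rw [pvSeg_cons_neg (by omega : s - ((n : Int) + 1) < s),
        show s - ((n : Int) + 1) = (s - 1) - n from by ring, ih (s - 1),
        List.range_succ_eq_map]
    simp only [List.map_cons, List.map_map, Function.comp_def, Nat.cast_zero]
    refine congrArg₂ _ (by ring) ?_
    exact List.map_congr_left (fun k _ => by push_cast; ring)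

-- A's increasing loop consumes its whole range (the break fires on the last element)
theorem pvLoopSeg_pos (t : Int) (f : Int → Int × Int) :
    ∀ (n : ℕ) (s : Int) (acc : List (Int × Int)), s < t → (t - s).natAbs = n →
      pvLoopSeg t f (PySem.List.pyRange (s + 1) (t + 1) 1) acc = acc ++ (pvSeg t s).map f := by
  intro n
  induction n using Nat.strong_induction_on with
  | _ n ih =>
    intro s acc h hn
    rw [PySem.List.pyRange_one_cons (by omega : s + 1 < t + 1)]
    rw [pvLoopSeg]
    by_cases h2 : s + 1 = t
    · rw [if_pos h2, pvSeg_cons_pos h, h2, pvSeg_nil]; simp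
    · rw [if_neg h2]
      rw [ih (t - (s+1)).natAbs (by omega) (s+1) (acc ++ [f (s+1)]) (by omega) rfl]
      rw [pvSeg_cons_pos h]
      simp

-- A's decreasing loop likewise
theorem pvLoopSeg_neg (t : Int) (f : Int → Int × Int) :
    ∀ (n : ℕ) (s : Int) (acc : List (Int × Int)), t < s → (t - s).natAbs = n →
      pvLoopSeg t f (PySem.List.pyRange (s + -1) (t + -1) (-1)) acc = acc ++ (pvSeg t s).map f := by
  intro n
  induction n using Nat.strong_induction_on with
  | _ n ih =>
    intro s acc h hn
    rw [PySem.List.pyRange_neg_one_cons (by omega : t + -1 < s + -1)]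
    rw [pvLoopSeg]
    by_cases h2 : s - 1 = t
    · rw [if_pos (by omega : s + -1 = t), pvSeg_cons_neg h, h2, pvSeg_nil,
        show s + (-1 : Int) = t from by omega]
      simp
    · rw [if_neg (by omega : ¬ s + -1 = t)]
      rw [show s + -1 - 1 = (s - 1) + (-1 : Int) from by ring]
      rw [ih (t - (s-1)).natAbs (by omega) (s-1) (acc ++ [f (s + -1)]) (by omega) rfl]
      rw [pvSeg_cons_neg h, show s + (-1 : Int) = s - 1 from by ring]
      simp

theorem getLast_acc_seg (acc : List (Int × Int)) (f : Int → Int × Int) {s t : Int} (h : s ≠ t) :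
    (acc ++ (pvSeg t s).map f).getLast? = some (f t) := by
  rw [List.getLast?_append_of_ne_nil _ (by simp [pvSeg_ne_nil h])]
  rw [List.getLast?_map, pvSeg_getLast' h]
  rfl

-- one of A's conditional direction-aware loops equals appending the segment
theorem pvLoop_eq (t s : Int) (f : Int → Int × Int) (acc : List (Int × Int)) :
    (if t ≠ s then
        pvLoopSeg t f
          (PySem.List.pyRange (s + (if t > s then 1 else -1)) (t + (if t > s then 1 else -1))
            (if t > s then 1 else -1)) acc
      else acc) = acc ++ (pvSeg t s).map f := by
  by_cases h : t = s
  · rw [if_neg (by simp [h]), h, pvSeg_nil]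
    simp
  · rw [if_pos h]
    by_cases hlt : s < t
    · rw [if_pos (by omega : t > s)]
      exact pvLoopSeg_pos t f (t - s).natAbs s acc hlt rfl
    · rw [if_neg (by omega : ¬ t > s)]
      exact pvLoopSeg_neg t f (t - s).natAbs s acc (by omega) rfl

-- the sign-scaled closed form: pvSeg t s = [s + d*1, …, s + d*|t-s|]
theorem pvSeg_eq_map (s t sgn : Int) (hs : sgn = if s ≤ t then 1 else -1) :
    pvSeg t s = (List.range (t - s).natAbs).map (fun k : ℕ => s + sgn * ((k : Int) + 1)) := by
  by_cases h : s ≤ t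
  · obtain ⟨n, hn⟩ : ∃ n : ℕ, t = s + n := ⟨(t - s).natAbs, by omega⟩
    subst hn
    rw [hs, if_pos h, show (s + (n : Int) - s).natAbs = n from by omega, pvSeg_eq_map_pos]
    exact List.map_congr_left (fun k _ => by ring)
  · obtain ⟨n, hn⟩ : ∃ n : ℕ, t = s - n := ⟨(t - s).natAbs, by omega⟩
    subst hn
    rw [hs, if_neg h, show (s - (n : Int) - s).natAbs = n from by omega, pvSeg_eq_map_neg]
    exact List.map_congr_left (fun k _ => by ring)

-- B's comprehension splits at index adx into the x-segment and the y-segment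
theorem alt_eq (x0 y0 x1 y1 : Int) :
    manhattan_path_py_alt (x0, y0) (x1, y1) =
      ((x0, y0) :: (pvSeg x1 x0).map (fun v => (v, y0))) ++ (pvSeg y1 y0).map (fun v => (x1, v)) := by
  simp only [manhattan_path_py_alt]
  set sx : Int := if x1 ≥ x0 then 1 else -1 with hsx
  set sy : Int := if y1 ≥ y0 then 1 else -1 with hsy
  set m : ℕ := (x1 - x0).natAbs with hm
  set n : ℕ := (y1 - y0).natAbs with hn
  have hadx : |x1 - x0| = (m : Int) := by rw [hm]; exact (Int.abs_eq_natAbs _)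
  have hady : |y1 - y0| = (n : Int) := by rw [hn]; exact (Int.abs_eq_natAbs _)
  have hx1 : x0 + sx * m = x1 := by rw [hsx]; split <;> omega
  rw [hadx, hady, PySem.List.pyRange_one,
      show ((m : Int) + n + 1 - 0).toNat = (m + 1) + n from by omega,
      List.range_add]
  simp only [List.map_append, List.map_map, Function.comp_def]
  rw [pvSeg_eq_map x0 x1 sx (by exact hsx), ← hm,
      pvSeg_eq_map y0 y1 sy (by exact hsy), ← hn,
      List.map_map, List.map_map]
  rw [List.range_succ_eq_map]
  simp only [Function.comp_def, List.cons_append, List.map_cons, List.map_map, Nat.cast_zero]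
  refine congrArg₂ (· :: ·) ?_ (congrArg₂ (· ++ ·) ?_ ?_)
  · rw [show min ((0:Int) + 0) m = 0 from by omega,
        show max ((0:Int) + 0 - m) 0 = 0 from by omega]
    simp
  · refine List.map_congr_left (fun k hk => ?_)
    have hk' : k < m := List.mem_range.mp hk
    have hc : (k.succ : Int) = (k : Int) + 1 := by push_cast; ring
    rw [show min ((0:Int) + (k.succ : Int)) m = (k : Int) + 1 from by omega,
        show max ((0:Int) + (k.succ : Int) - m) 0 = 0 from by omega]
    simp
  · refine List.map_congr_left (fun k _ => ?_)
    have hc : ((m + 1 + k : ℕ) : Int) = (m : Int) + 1 + k := by push_cast; ring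
    rw [show min ((0:Int) + ((m + 1 + k : ℕ) : Int)) m = (m : Int) from by omega,
        show max ((0:Int) + ((m + 1 + k : ℕ) : Int) - m) 0 = (k : Int) + 1 from by omega,
        hx1]

-- ===== VERDICT (by name: the statement is the Claim_ definition above) =====
theorem manhattan_path_py_spec : Claim_equal_manhattan_path_py := by
  intro a b _
  obtain ⟨x0, y0⟩ := a
  obtain ⟨x1, y1⟩ := b
  show manhattan_path_py (x0, y0) (x1, y1) = manhattan_path_py_alt (x0, y0) (x1, y1)
  rw [alt_eq]
  simp only [manhattan_path_py]
  rw [pvLoop_eq x1 x0 (fun x => (x, y0)) [(x0, y0)]]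
  rw [pvLoop_eq y1 y0 (fun y => (x1, y)) ([(x0, y0)] ++ (pvSeg x1 x0).map (fun x => (x, y0)))]
  have hlast :
      (([(x0, y0)] ++ (pvSeg x1 x0).map (fun x => (x, y0))) ++
          (pvSeg y1 y0).map (fun y => (x1, y))).getLast? = some (x1, y1) := by
    by_cases hy : y0 = y1
    · rw [hy, pvSeg_nil]
      by_cases hx : x0 = x1
      · rw [hx, pvSeg_nil]
        simp
      · simp only [List.map_nil, List.append_nil]
        rw [getLast_acc_seg _ _ hx]
    · rw [getLast_acc_seg _ _ hy]
  rw [if_neg (by simp only [List.cons_append, List.nil_append] at hlast; simp [hlast])]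
  simp
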